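-- pv_equiv track=rewrite | github.com/LucasBorboleta/jersi-certu | jersi_certu.py | __textify_positions
-- ===== SOURCE A (Python) =====
-- def __textify_positions(positions):
--     """Convert all given piece positions as a list of string."""
--
--     lines = list()
--
--     start_index = 0
--
--     for (node_label, piece_names) in  sorted(positions.items()):
--
--         for piece_name in piece_names:
--
--             piece_text = "%s:%s" % (node_label, piece_name)
--
--             if start_index % 2 == 0:
--                 lines.append(piece_text)
--             else:
--                 lines[-1] += " "*2 + piece_text
--
--             start_index += 1
--
--     return lines
-- ===== SOURCE B (Python) =====
-- def __textify_positions(positions):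
--     """Convert all given piece positions as a list of string."""
--
--     flat = ["%s:%s" % (node_label, piece_name)
--             for (node_label, piece_names) in sorted(positions.items())
--             for piece_name in piece_names]
--
--     lines = []
--     i = 0
--     while i < len(flat):
--         lines.append("  ".join(flat[i:i + 2]))
--         i += 2
--
--     return lines
-- ===== Notes on version B (the rewrite author's own statement) =====
-- stated objective: simpler
-- what changed: Replaces A's running parity counter with in-place lines[-1] mutation by a build-then-group decomposition: one pass builds the flat list of 'label:name' strings, then the output is produced by joining that list two per line.
import Mathlib
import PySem

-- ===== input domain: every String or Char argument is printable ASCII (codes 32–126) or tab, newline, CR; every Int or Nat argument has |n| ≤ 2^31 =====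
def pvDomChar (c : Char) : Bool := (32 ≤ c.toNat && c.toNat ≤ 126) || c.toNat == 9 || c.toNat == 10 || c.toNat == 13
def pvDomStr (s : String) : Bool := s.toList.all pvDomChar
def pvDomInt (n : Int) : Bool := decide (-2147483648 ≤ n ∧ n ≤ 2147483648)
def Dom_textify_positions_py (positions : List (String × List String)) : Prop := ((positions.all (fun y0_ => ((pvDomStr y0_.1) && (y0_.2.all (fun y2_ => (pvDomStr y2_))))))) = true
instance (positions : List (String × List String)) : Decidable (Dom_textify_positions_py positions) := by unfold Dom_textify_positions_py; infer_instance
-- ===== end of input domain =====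

-- B replaces A's parity counter and lines[-1] mutation by a flatten-then-chunk decomposition (objective: simpler).

-- ===== PORT A =====
-- one iteration of A's inner loop body: append on even start_index, extend lines[-1] on odd
def tpStep (s : List String × Int) (t : String) : List String × Int :=
  if PySem.Int.mod s.2 2 = 0 then
    (s.1 ++ [t], s.2 + 1)
  else
    ((match s.1.getLast? with
      | some l => s.1.dropLast ++ [l ++ "  " ++ t]
      | none => s.1),   -- lines[-1] on empty lines: unreachable (start_index odd implies lines ≠ [])
     s.2 + 1)

def textify_positions_py (positions : List (String × List String)) : List String :=
  ((PySem.List.sorted positions (fun p => p.1) false).foldl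
      (fun s p => p.2.foldl (fun s n => tpStep s (p.1 ++ ":" ++ n)) s)
      ([], 0)).1

-- ===== PORT B =====
-- the while loop of Source B: consume the flat list two at a time, joining each pair with two spaces
def tpChunk2 : List String → List String
  | [] => []
  | [a] => [a]
  | a :: b :: r => (a ++ "  " ++ b) :: tpChunk2 r

def textify_positions_py_alt (positions : List (String × List String)) : List String :=
  tpChunk2 ((PySem.List.sorted positions (fun p => p.1) false).flatMap
    (fun p => p.2.map (fun n => p.1 ++ ":" ++ n)))

-- ===== PRECONDITION & SPEC =====
-- positions is a Python dict, whose keys are necessarily distinct; Pre_ states that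
-- representation invariant (on it, sorted(positions.items()) is sorting by key alone,
-- which is how both ports realise it). It excludes no input the Python function can receive.
def Pre_textify_positions_py (positions : List (String × List String)) : Prop :=
  (positions.map Prod.fst).Nodup
instance (positions : List (String × List String)) : Decidable (Pre_textify_positions_py positions) := by unfold Pre_textify_positions_py; infer_instance

def pvWitness_textify_positions_py : (List (String × List String)) :=
  [("b2", ["x", "y", "z"]), ("a1", ["w"])]

def Spec_textify_positions_py (positions : List (String × List String)) (out : List String) : Prop := out = textify_positions_py_alt positions
instance (positions : List (String × List String)) (out : List String) : Decidable (Spec_textify_positions_py positions out) := by unfold Spec_textify_positions_py; infer_instance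

-- ===== CLAIM (what is proved, stated in full; the proofs are below) =====
def Claim_equal_textify_positions_py : Prop := ∀ (positions : List (String × List String)), Dom_textify_positions_py positions → Pre_textify_positions_py positions → Spec_textify_positions_py positions (textify_positions_py positions)

-- ===== LEMMAS AND PROOFS =====

-- folding A's step over any list of texts from an even start_index appends exactly B's chunking
theorem tp_foldl_even (ts : List String) :
    ∀ (acc : List String) (n : Int), PySem.Int.mod n 2 = 0 →
      (ts.foldl tpStep (acc, n)).1 = acc ++ tpChunk2 ts := by
  induction ts using tpChunk2.induct with
  | case1 => intro acc n _; simp [tpChunk2]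
  | case2 a =>
      intro acc n h
      have h2 : n % 2 = 0 := by
        rwa [PySem.Int.mod_eq_emod_of_pos (by norm_num)] at h
      have hdvd : (2 : Int) ∣ n := by omega
      simp [tpStep, hdvd, tpChunk2]
  | case3 a b r ih =>
      intro acc n h
      have h2 : n % 2 = 0 := by
        rwa [PySem.Int.mod_eq_emod_of_pos (by norm_num)] at h
      have hdvd : (2 : Int) ∣ n := by omega
      have hnd : ¬ (2 : Int) ∣ (n + 1) := by omega
      have heven : PySem.Int.mod (n + 1 + 1) 2 = 0 := by
        rw [PySem.Int.mod_eq_emod_of_pos (by norm_num)]; omega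
      show ((b :: r).foldl tpStep (tpStep (acc, n) a)).1 = acc ++ tpChunk2 (a :: b :: r)
      rw [show tpStep (acc, n) a = (acc ++ [a], n + 1) by simp [tpStep, hdvd]]
      show (r.foldl tpStep (tpStep (acc ++ [a], n + 1) b)).1 = acc ++ tpChunk2 (a :: b :: r)
      rw [show tpStep (acc ++ [a], n + 1) b = (acc ++ [a ++ "  " ++ b], n + 1 + 1) by
        simp [tpStep, hnd]]
      rw [ih (acc ++ [a ++ "  " ++ b]) (n + 1 + 1) heven]
      simp [tpChunk2]

-- A's nested loops over (label, names) pairs are the fold of tpStep over B's flat list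
theorem tp_foldl_flat (items : List (String × List String)) :
    ∀ (s : List String × Int),
      items.foldl (fun s p => p.2.foldl (fun s n => tpStep s (p.1 ++ ":" ++ n)) s) s
        = (items.flatMap (fun p => p.2.map (fun n => p.1 ++ ":" ++ n))).foldl tpStep s := by
  induction items with
  | nil => intro s; simp
  | cons p rest ih =>
      intro s
      simp only [List.foldl_cons, List.flatMap_cons, List.foldl_append, List.foldl_map]
      exact ih _

-- ===== VERDICT (by name: the statement is the Claim_ definition above) =====
theorem textify_positions_py_spec : Claim_equal_textify_positions_py := by
  intro positions _ _
  unfold Spec_textify_positions_py textify_positions_py textify_positions_py_alt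
  rw [tp_foldl_flat, tp_foldl_even _ [] 0 (by decide)]
  simp
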